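-- pv_equiv track=rewrite | github.com/calvinator42000/AoC | 2023/13_day/1_pt/main.py | getRefl
-- ===== SOURCE A (Python) =====
-- def getRefl(line, refl_points):
--     point_i = 0
--     while point_i < len(refl_points):
--         point = refl_points[point_i]
--         left = line[:point][::-1]
--         right = line[point:]
--         refl_len = min(len(left), len(right))
--         if right[:refl_len] != left[:refl_len]:
--             refl_points.pop(point_i)
--         else:
--             point_i += 1
--     return refl_points
-- ===== SOURCE B (Python) =====
-- def getRefl(line, refl_points):
--     n = len(line)
--
--     def mirrors(p):
--         # effective split index, clamped the way Python clamps slice bounds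
--         e = p if p >= 0 else n + p
--         e = 0 if e < 0 else (n if e > n else e)
--         m = min(e, n - e)
--         return all(line[e - 1 - k] == line[e + k] for k in range(m))
--
--     return [p for p in refl_points if mirrors(p)]
-- ===== Notes on version B (the rewrite author's own statement) =====
-- stated objective: alternative
-- what changed: B replaces A's destructive while-loop-with-pop and its per-candidate slice/reverse/compare with a non-mutating filter that clamps each point to an effective split index and does a short-circuiting pairwise character comparison (no slice copies, no list shifting).
import Mathlib
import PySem

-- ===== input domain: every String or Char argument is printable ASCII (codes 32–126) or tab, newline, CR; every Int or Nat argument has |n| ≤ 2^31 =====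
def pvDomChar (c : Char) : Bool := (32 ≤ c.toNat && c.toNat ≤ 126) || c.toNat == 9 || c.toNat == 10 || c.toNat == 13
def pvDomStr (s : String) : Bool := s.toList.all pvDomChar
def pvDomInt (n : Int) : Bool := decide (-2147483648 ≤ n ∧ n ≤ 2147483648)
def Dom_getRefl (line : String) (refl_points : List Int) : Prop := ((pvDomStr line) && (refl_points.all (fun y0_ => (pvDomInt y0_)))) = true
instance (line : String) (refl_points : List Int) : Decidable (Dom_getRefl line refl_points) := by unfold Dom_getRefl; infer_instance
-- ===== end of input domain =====

-- B replaces A's destructive while-loop-with-pop and per-candidate slice/reverse/compare by a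
-- non-mutating filter with a clamped split index and a short-circuiting pairwise character
-- comparison (no slice copies, no list shifting; same worst-case cost). A mutates
-- refl_points in place; the equivalence proved here is about the RETURN value only (B does not).

-- ===== PORT A =====
-- body of the while loop: keep point_i's entry iff right[:refl_len] == left[:refl_len]
def keepA (l : List Char) (point : Int) : Bool :=
  let left := (PySem.List.slice l none (some point)).reverse  -- line[:point][::-1]; [::-1] is reverse (PySem.List.slice?_none_none_neg_one)
  let right := PySem.List.slice l (some point) none           -- line[point:]
  let reflLen : Int := ((min left.length right.length : Nat) : Int)
  PySem.List.slice right none (some reflLen) == PySem.List.slice left none (some reflLen)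

-- the while loop: state = (refl_points, point_i); pop(point_i) is eraseIdx at the in-range index
def loopA (l : List Char) (pts : List Int) (i : Nat) : List Int :=
  if h : i < pts.length then
    let point := pts[i]
    if keepA l point then loopA l pts (i + 1)
    else loopA l (pts.eraseIdx i) i
  else pts
termination_by pts.length - i
decreasing_by
  · omega
  · simp only [List.length_eraseIdx, h, if_pos]; omega

def getRefl (line : String) (refl_points : List Int) : List Int :=
  loopA line.toList refl_points 0

-- ===== PORT B =====
-- effective split index: e = p if p>=0 else n+p, clamped to [0,n]
def effIdx (n : Nat) (p : Int) : Nat :=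
  let e0 : Int := if 0 ≤ p then p else (n : Int) + p
  if e0 < 0 then 0 else if (n : Int) < e0 then n else e0.toNat

def mirrorsB (l : List Char) (n : Nat) (p : Int) : Bool :=
  let e := effIdx n p
  let m := min e (n - e)
  (List.range m).all fun k => l.getD (e - 1 - k) ' ' == l.getD (e + k) ' '

def getRefl_alt (line : String) (refl_points : List Int) : List Int :=
  let l := line.toList
  refl_points.filter (fun p => mirrorsB l l.length p)

-- ===== PRECONDITION & SPEC =====
def Spec_getRefl (line : String) (refl_points : List Int) (out : List Int) : Prop := out = getRefl_alt line refl_points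
instance (line : String) (refl_points : List Int) (out : List Int) : Decidable (Spec_getRefl line refl_points out) := by unfold Spec_getRefl; infer_instance

-- ===== CLAIM (what is proved, stated in full; the proofs are below) =====
def Claim_equal_getRefl : Prop := ∀ (line : String) (refl_points : List Int), Dom_getRefl line refl_points → Spec_getRefl line refl_points (getRefl line refl_points)

-- ===== LEMMAS AND PROOFS =====

theorem effIdx_le (n : Nat) (p : Int) : effIdx n p ≤ n := by
  unfold effIdx; dsimp only; split_ifs <;> omega

theorem slice_to_eff (l : List Char) (p : Int) :
    PySem.List.slice l none (some p) = l.take (effIdx l.length p) := by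
  by_cases hp : 0 ≤ p
  · rw [PySem.List.slice_to l hp]
    unfold effIdx
    dsimp only
    rw [if_pos hp]
    split_ifs with h1 h2
    · exfalso; omega
    · rw [List.take_length, List.take_of_length_le (by omega)]
    · rfl
  · have hp' : p = -(((-p).toNat : Nat) : Int) := by omega
    conv_lhs => rw [hp']
    rw [PySem.List.slice_to_neg_natCast l (-p).toNat (by omega)]
    unfold effIdx
    dsimp only
    rw [if_neg hp]
    split_ifs with h1 h2
    · congr 1; omega
    · exfalso; omega
    · congr 1; omega

theorem slice_from_eff (l : List Char) (p : Int) :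
    PySem.List.slice l (some p) none = l.drop (effIdx l.length p) := by
  by_cases hp : 0 ≤ p
  · rw [PySem.List.slice_from l hp]
    unfold effIdx
    dsimp only
    rw [if_pos hp]
    split_ifs with h1 h2
    · exfalso; omega
    · rw [List.drop_length, List.drop_eq_nil_of_le (by omega)]
    · rfl
  · have hp' : p = -(((-p).toNat : Nat) : Int) := by omega
    conv_lhs => rw [hp']
    rw [PySem.List.slice_from_neg_natCast l (-p).toNat (by omega)]
    unfold effIdx
    dsimp only
    rw [if_neg hp]
    split_ifs with h1 h2
    · congr 1; omega
    · exfalso; omega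
    · congr 1; omega

theorem take_drop_eq_iff (l : List Char) (e m : Nat) (he : e ≤ l.length)
    (hm : m = min e (l.length - e)) :
    ((l.drop e).take m = ((l.take e).reverse).take m) ↔
      (∀ k, k < m → l.getD (e - 1 - k) ' ' = l.getD (e + k) ' ') := by
  constructor
  · intro h k hk
    have hk1 : k < e := by omega
    have hk2 : k < l.length - e := by omega
    have hlen : k < ((l.drop e).take m).length := by
      simp only [List.length_take, List.length_drop]; omega
    have hE := List.getElem_of_eq h hlen
    simp only [List.getElem_take, List.getElem_drop, List.getElem_reverse,
      List.length_take, Nat.min_eq_left he] at hE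
    rw [List.getD_eq_getElem l ' ' (by omega), List.getD_eq_getElem l ' ' (by omega)]
    exact hE.symm
  · intro h
    apply List.ext_getElem
    · simp only [List.length_take, List.length_drop, List.length_reverse]; omega
    · intro i h1 h2
      have him : i < m := by
        simp only [List.length_take, List.length_drop] at h1; omega
      have hi1 : i < e := by omega
      have hi2 : i < l.length - e := by omega
      have hh := h i him
      rw [List.getD_eq_getElem l ' ' (by omega), List.getD_eq_getElem l ' ' (by omega)] at hh
      simp only [List.getElem_take, List.getElem_drop, List.getElem_reverse,
        List.length_take, Nat.min_eq_left he]
      exact hh.symm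

theorem keep_eq (l : List Char) (p : Int) : keepA l p = mirrorsB l l.length p := by
  have he : effIdx l.length p ≤ l.length := effIdx_le l.length p
  unfold keepA mirrorsB
  rw [slice_to_eff, slice_from_eff]
  dsimp only
  simp only [List.length_reverse, List.length_take, List.length_drop, Nat.min_eq_left he]
  rw [PySem.List.slice_to_natCast, PySem.List.slice_to_natCast]
  rw [Bool.eq_iff_iff]
  simp only [beq_iff_eq, List.all_eq_true, List.mem_range]
  exact take_drop_eq_iff l (effIdx l.length p) _ he rfl

theorem loopA_eq (l : List Char) (pts : List Int) (i : Nat) :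
    loopA l pts i = pts.take i ++ (pts.drop i).filter (fun q => keepA l q) := by
  fun_induction loopA l pts i with
  | case1 pts i h point hkeep ih =>
    rw [ih]
    conv_rhs => rw [List.drop_eq_getElem_cons h]
    rw [List.filter_cons_of_pos hkeep]
    have ht : pts.take (i + 1) = pts.take i ++ [pts[i]] := by
      rw [List.take_add_one, List.getElem?_eq_getElem h]; rfl
    rw [ht, List.append_assoc]; rfl
  | case2 pts i h point hkeep ih =>
    rw [ih, List.eraseIdx_eq_take_drop_succ]
    rw [List.take_left' (by simp only [List.length_take]; omega),
        List.drop_left' (by simp only [List.length_take]; omega)]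
    conv_rhs => rw [List.drop_eq_getElem_cons h]
    rw [List.filter_cons_of_neg (by simpa using hkeep)]
  | case3 pts i h =>
    rw [List.take_of_length_le (by omega), List.drop_eq_nil_of_le (by omega)]
    simp

-- ===== VERDICT (by name: the statement is the Claim_ definition above) =====
theorem getRefl_spec : Claim_equal_getRefl := by
  intro line pts _
  unfold Spec_getRefl getRefl getRefl_alt
  rw [loopA_eq]
  simp only [List.take_zero, List.drop_zero, List.nil_append]
  exact List.filter_congr (fun q _ => keep_eq _ q)
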